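-- pv_equiv track=rewrite | github.com/Capij/htmlJson | htmlJson.py | searchEndValue
-- ===== SOURCE A (Python) =====
-- def searchEndValue(c,value):
--     endValue = 0
--     i = 0
--     for x in c:
--         if(x == value):
--             endValue = i
--         i += 1
--     return endValue
-- ===== SOURCE B (Python) =====
-- def searchEndValue(c, value):
--     seq = list(c)
--     for i in range(len(seq) - 1, -1, -1):
--         if seq[i] == value:
--             return i
--     return 0
-- ===== Notes on version B (the rewrite author's own statement) =====
-- stated objective: alternative
-- what changed: Replaces the forward pass that keeps updating a last-match accumulator and a manual counter with a backward indexed scan that returns at the first match from the end (0 if none), so no accumulator state is carried.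
import Mathlib
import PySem

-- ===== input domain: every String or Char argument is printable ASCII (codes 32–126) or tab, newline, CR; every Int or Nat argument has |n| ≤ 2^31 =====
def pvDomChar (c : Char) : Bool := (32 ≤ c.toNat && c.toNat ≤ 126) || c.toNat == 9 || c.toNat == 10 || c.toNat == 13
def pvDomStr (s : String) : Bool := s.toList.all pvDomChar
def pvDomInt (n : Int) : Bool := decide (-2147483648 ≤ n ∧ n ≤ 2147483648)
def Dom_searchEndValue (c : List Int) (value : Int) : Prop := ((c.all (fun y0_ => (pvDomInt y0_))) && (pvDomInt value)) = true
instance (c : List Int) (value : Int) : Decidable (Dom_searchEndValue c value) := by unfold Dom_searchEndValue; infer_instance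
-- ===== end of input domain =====

-- B replaces A's forward pass with accumulator by a backward indexed scan returning at the first match from the end; alternative decomposition, same cost.

-- ===== PORT A =====
-- forward loop carrying (endValue, i); literal transliteration of A's for-loop
def pvAGo (value : Int) : List Int → Int → Int → Int
  | [], endValue, _ => endValue
  | x :: xs, endValue, i => pvAGo value xs (if x = value then i else endValue) (i + 1)

def searchEndValue (c : List Int) (value : Int) : Int := pvAGo value c 0 0

-- ===== PORT B =====
-- backward scan: checks index n-1, n-2, …, 0; returns the first matching index, else 0.
-- seq[n]? is always `some` at the indices visited (n < length), matching Python's seq[i].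
def pvBGo (seq : List Int) (value : Int) : Nat → Int
  | 0 => 0
  | n + 1 =>
      match seq[n]? with
      | some x => if x = value then (n : Int) else pvBGo seq value n
      | none => pvBGo seq value n

def searchEndValue_alt (c : List Int) (value : Int) : Int := pvBGo c value c.length

-- ===== PRECONDITION & SPEC =====
def Spec_searchEndValue (c : List Int) (value : Int) (out : Int) : Prop := out = searchEndValue_alt c value
instance (c : List Int) (value : Int) (out : Int) : Decidable (Spec_searchEndValue c value out) := by unfold Spec_searchEndValue; infer_instance

-- ===== CLAIM (what is proved, stated in full; the proofs are below) =====
def Claim_equal_searchEndValue : Prop := ∀ (c : List Int) (value : Int), Dom_searchEndValue c value → Spec_searchEndValue c value (searchEndValue c value)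

-- ===== LEMMAS AND PROOFS =====

theorem pvAGo_append_single (value x : Int) (xs : List Int) :
    ∀ (e i : Int), pvAGo value (xs ++ [x]) e i =
      if x = value then i + (xs.length : Int) else pvAGo value xs e i := by
  induction xs with
  | nil =>
      intro e i
      simp [pvAGo]
  | cons y ys ih =>
      intro e i
      simp only [List.cons_append, pvAGo, ih, List.length_cons]
      by_cases h : x = value
      · simp only [h, if_true]; push_cast; ring
      · simp only [h, if_false]

theorem pvBGo_append (seq : List Int) (x value : Int) :
    ∀ (n : Nat), n ≤ seq.length → pvBGo (seq ++ [x]) value n = pvBGo seq value n := by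
  intro n
  induction n with
  | zero => intro _; rfl
  | succ m ih =>
      intro h
      have hm : m < seq.length := Nat.lt_of_succ_le h
      simp only [pvBGo, List.getElem?_append_left hm,
        ih (Nat.le_of_lt hm)]

theorem pv_main (value : Int) (c : List Int) :
    pvAGo value c 0 0 = pvBGo c value c.length := by
  induction c using List.reverseRecOn with
  | nil => rfl
  | append_singleton xs x ih =>
      rw [pvAGo_append_single]
      simp only [List.length_append, List.length_singleton]
      have hget : (xs ++ [x])[xs.length]? = some x := by
        simp
      rw [show xs.length + 1 = xs.length + 1 from rfl]
      simp only [pvBGo, hget]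
      rw [pvBGo_append xs x value xs.length (Nat.le_refl _)]
      split_ifs with h
      · simp
      · exact ih

-- ===== VERDICT (by name: the statement is the Claim_ definition above) =====
theorem searchEndValue_spec : Claim_equal_searchEndValue := by
  intro c value _
  unfold Spec_searchEndValue searchEndValue searchEndValue_alt
  exact pv_main value c
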